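-- pv_equiv track=rewrite | github.com/Abdul-Basit77/eYantra2023-24 | Stage2/Task6/connect_bot.py | arrange_events_in_priority
-- ===== SOURCE A (Python) =====
-- def arrange_events_in_priority(all_classified_events,event_locations_xyw):
--     events_priority_order=["Fire","Destroyed buildings","Humanitarian Aid and rehabilitatiion","Military Vehicles","Combat"]
--     event_location_nodes={"A":5,"B":12,"C":13,"D":6,"E":7}
--     arranged_all_classified_events=[]
--     arranged_event_location_xyw=[]
--     for priority in events_priority_order:
--         j=0
--         for event_loc,event_class in all_classified_events.items():
--             if event_class == priority:
--                 arranged_all_classified_events.append(event_location_nodes[event_loc])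
--                 arranged_event_location_xyw.append(event_locations_xyw[j])
--             j+=1
--     arranged_all_classified_events.append(17)
--     arranged_event_location_xyw.append((40,780,20))
--     return arranged_all_classified_events,arranged_event_location_xyw #It returns the arranged events and their locations as a tuple.
-- ===== SOURCE B (Python) =====
-- def arrange_events_in_priority(all_classified_events, event_locations_xyw):
--     events_priority_order = ["Fire", "Destroyed buildings",
--                              "Humanitarian Aid and rehabilitatiion",
--                              "Military Vehicles", "Combat"]
--     event_location_nodes = {"A": 5, "B": 12, "C": 13, "D": 6, "E": 7}
--     # one pass: group (node, xyw) pairs by class, keeping dict order inside a group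
--     buckets = {p: [] for p in events_priority_order}
--     for j, (event_loc, event_class) in enumerate(all_classified_events.items()):
--         if event_class in buckets:
--             buckets[event_class].append((event_location_nodes[event_loc],
--                                          event_locations_xyw[j]))
--     nodes, xyws = [], []
--     for p in events_priority_order:
--         for n, xy in buckets[p]:
--             nodes.append(n)
--             xyws.append(xy)
--     nodes.append(17)
--     xyws.append((40, 780, 20))
--     return nodes, xyws
-- ===== Notes on version B (the rewrite author's own statement) =====
-- stated objective: alternative
-- what changed: B groups events into per-class buckets in one enumerate pass over the dict and then emits the buckets in priority order, instead of A's five full scans of the dict (one per priority class).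
import Mathlib
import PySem

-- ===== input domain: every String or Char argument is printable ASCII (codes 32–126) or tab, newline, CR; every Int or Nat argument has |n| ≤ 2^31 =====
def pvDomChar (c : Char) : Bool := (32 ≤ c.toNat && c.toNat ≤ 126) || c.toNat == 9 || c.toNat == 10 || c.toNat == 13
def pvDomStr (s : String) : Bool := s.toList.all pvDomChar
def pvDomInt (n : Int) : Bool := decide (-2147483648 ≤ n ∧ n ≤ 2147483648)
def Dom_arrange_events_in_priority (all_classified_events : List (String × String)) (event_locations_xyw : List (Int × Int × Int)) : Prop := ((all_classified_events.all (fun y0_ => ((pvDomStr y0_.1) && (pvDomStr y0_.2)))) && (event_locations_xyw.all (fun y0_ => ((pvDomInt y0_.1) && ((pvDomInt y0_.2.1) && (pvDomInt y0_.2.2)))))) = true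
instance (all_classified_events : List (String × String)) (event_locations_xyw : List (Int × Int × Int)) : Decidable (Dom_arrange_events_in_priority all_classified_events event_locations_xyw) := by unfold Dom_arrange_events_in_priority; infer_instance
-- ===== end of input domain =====

-- B groups events into per-class buckets in one pass over the dict and emits the buckets
-- in priority order, instead of A's five full scans of the dict (one scan per priority class).

-- shared literal constants of both Python versions
def pvPrio : List String :=
  ["Fire", "Destroyed buildings", "Humanitarian Aid and rehabilitatiion",
   "Military Vehicles", "Combat"]
def pvNodes : PySem.Dict String Int :=
  PySem.Dict.ofList [("A", 5), ("B", 12), ("C", 13), ("D", 6), ("E", 7)]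

-- ===== PORT A =====
def arrange_events_in_priority (all_classified_events : List (String × String)) (event_locations_xyw : List (Int × Int × Int)) : List Int × (List (Int × Int × Int)) :=
  -- for each priority, scan the whole dict with a hand-kept counter j
  let r := pvPrio.foldl
    (fun (acc : List Int × List (Int × Int × Int)) priority =>
      (all_classified_events.foldl
        (fun (st : (List Int × List (Int × Int × Int)) × Int) e =>
          if e.2 == priority then
            ((st.1.1 ++ [pvNodes.getD e.1 0],
              st.1.2 ++ [PySem.List.pyGetD event_locations_xyw st.2 (0, 0, 0)]), st.2 + 1)
          else (st.1, st.2 + 1))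
        (acc, (0 : Int))).1)
    ([], [])
  (r.1 ++ [17], r.2 ++ [(40, 780, 20)])

-- ===== PORT B =====
def pvBuckets0 : PySem.Dict String (List (Int × (Int × Int × Int))) :=
  PySem.Dict.ofList (pvPrio.map (fun p => (p, [])))

def arrange_events_in_priority_alt (all_classified_events : List (String × String)) (event_locations_xyw : List (Int × Int × Int)) : List Int × (List (Int × Int × Int)) :=
  -- one enumerate pass filling the buckets, then emit in priority order
  let bk := (PySem.List.enumerate all_classified_events 0).foldl
    (fun d je =>
      if d.contains je.2.2 then
        d.modify je.2.2 []
          (fun l => l ++ [(pvNodes.getD je.2.1 0, PySem.List.pyGetD event_locations_xyw je.1 (0, 0, 0))])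
      else d)
    pvBuckets0
  let r := pvPrio.foldl
    (fun (acc : List Int × List (Int × Int × Int)) p =>
      (bk.getD p []).foldl (fun acc2 nx => (acc2.1 ++ [nx.1], acc2.2 ++ [nx.2])) acc)
    ([], [])
  (r.1 ++ [17], r.2 ++ [(40, 780, 20)])

-- ===== PRECONDITION & SPEC =====
-- Pre_ excludes exactly the inputs where the Python A raises — a KeyError (an event of one of the
-- five priority classes at a location outside A–E) or an IndexError (such an event at a dict
-- position with no entry in event_locations_xyw) — and association lists with duplicate keys,
-- which a Python dict argument cannot represent.
def Pre_arrange_events_in_priority (all_classified_events : List (String × String)) (event_locations_xyw : List (Int × Int × Int)) : Prop :=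
  (all_classified_events.map Prod.fst).Nodup ∧
  ∀ je ∈ PySem.List.enumerate all_classified_events 0,
    je.2.2 ∈ pvPrio → (pvNodes.contains je.2.1 = true ∧ je.1 < (event_locations_xyw.length : Int))
instance (all_classified_events : List (String × String)) (event_locations_xyw : List (Int × Int × Int)) : Decidable (Pre_arrange_events_in_priority all_classified_events event_locations_xyw) := by unfold Pre_arrange_events_in_priority; infer_instance

def pvWitness_arrange_events_in_priority : (List (String × String)) × (List (Int × Int × Int)) :=
  ([("A", "Fire"), ("C", "Combat")], [(1, 2, 3), (4, 5, 6)])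

def Spec_arrange_events_in_priority (all_classified_events : List (String × String)) (event_locations_xyw : List (Int × Int × Int)) (out : List Int × (List (Int × Int × Int))) : Prop := out = arrange_events_in_priority_alt all_classified_events event_locations_xyw
instance (all_classified_events : List (String × String)) (event_locations_xyw : List (Int × Int × Int)) (out : List Int × (List (Int × Int × Int))) : Decidable (Spec_arrange_events_in_priority all_classified_events event_locations_xyw out) := by unfold Spec_arrange_events_in_priority; infer_instance

-- ===== CLAIM (what is proved, stated in full; the proofs are below) =====
def Claim_equal_arrange_events_in_priority : Prop := ∀ (all_classified_events : List (String × String)) (event_locations_xyw : List (Int × Int × Int)), Dom_arrange_events_in_priority all_classified_events event_locations_xyw → Pre_arrange_events_in_priority all_classified_events event_locations_xyw → Spec_arrange_events_in_priority all_classified_events event_locations_xyw (arrange_events_in_priority all_classified_events event_locations_xyw)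

-- ===== LEMMAS AND PROOFS =====

-- the events of class p, with their dict positions (A and B both select exactly these, in order)
def pvSel (evs : List (String × String)) (j0 : Int) (p : String) : List (Int × String × String) :=
  (PySem.List.enumerate evs j0).filter (fun je => je.2.2 == p)

-- A's inner scan = append the selected nodes / coordinates for priority p
lemma pv_ainner (xyw : List (Int × Int × Int)) (p : String) :
    ∀ (evs : List (String × String)) (acc : List Int × List (Int × Int × Int)) (j0 : Int),
    (evs.foldl
        (fun (st : (List Int × List (Int × Int × Int)) × Int) e =>
          if e.2 == p then
            ((st.1.1 ++ [pvNodes.getD e.1 0],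
              st.1.2 ++ [PySem.List.pyGetD xyw st.2 (0, 0, 0)]), st.2 + 1)
          else (st.1, st.2 + 1))
        (acc, j0))
    = ((acc.1 ++ (pvSel evs j0 p).map (fun je => pvNodes.getD je.2.1 0),
        acc.2 ++ (pvSel evs j0 p).map (fun je => PySem.List.pyGetD xyw je.1 (0, 0, 0))),
       j0 + evs.length) := by
  intro evs
  induction evs with
  | nil => intro acc j0; simp [pvSel]
  | cons e rest ih =>
    intro acc j0
    cases h : (e.2 == p) with
    | true =>
      simp only [List.foldl_cons, h, if_true]
      rw [ih]
      simp only [pvSel, PySem.List.enumerate_cons, List.filter_cons, h,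
        List.length_cons, Prod.mk.injEq]
      refine ⟨⟨?_, ?_⟩, ?_⟩
      · simp [List.append_assoc]
      · simp [List.append_assoc]
      · push_cast; ring
    | false =>
      simp only [List.foldl_cons, h, Bool.false_eq_true, if_false]
      rw [ih]
      simp only [pvSel, PySem.List.enumerate_cons, List.filter_cons, h,
        List.length_cons, Prod.mk.injEq]
      refine ⟨⟨rfl, rfl⟩, ?_⟩
      push_cast; ring

-- B's grouping pass, read back through getD
lemma pv_bgroup (xyw : List (Int × Int × Int)) :
    ∀ (l : List (Int × String × String)) (d : PySem.Dict String (List (Int × (Int × Int × Int)))) (c : String),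
    (l.foldl
        (fun d je =>
          if d.contains je.2.2 then
            d.modify je.2.2 []
              (fun ls => ls ++ [(pvNodes.getD je.2.1 0, PySem.List.pyGetD xyw je.1 (0, 0, 0))])
          else d)
        d).getD c []
    = d.getD c [] ++
        ((l.filter (fun je => d.contains je.2.2 && (je.2.2 == c))).map
          (fun je => (pvNodes.getD je.2.1 0, PySem.List.pyGetD xyw je.1 (0, 0, 0)))) := by
  intro l
  induction l with
  | nil => intro d c; simp
  | cons je rest ih =>
    intro d c
    cases hc : d.contains je.2.2 with
    | true =>
      have hcont : ∀ k, (d.modify je.2.2 []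
          (fun ls => ls ++ [(pvNodes.getD je.2.1 0, PySem.List.pyGetD xyw je.1 (0, 0, 0))])).contains k
          = d.contains k := by
        intro k
        rw [PySem.Dict.contains_modify]
        cases hk : (k == je.2.2) with
        | true => simp [eq_of_beq hk, hc]
        | false => simp
      simp only [List.foldl_cons, hc, if_true, List.filter_cons,
        Bool.true_and]
      rw [ih, List.filter_congr (fun x _ => by rw [hcont])]
      cases hjc : (je.2.2 == c) with
      | true =>
        have hce : je.2.2 = c := eq_of_beq hjc
        subst hce
        simp [List.append_assoc]
      | false =>
        have hne : c ≠ je.2.2 := fun hx => by simp [hx] at hjc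
        simp [PySem.Dict.getD_modify, hne]
    | false =>
      simp only [List.foldl_cons, hc, Bool.false_eq_true, if_false, List.filter_cons,
        Bool.false_and]
      rw [ih]

-- B's emission loop over one bucket
lemma pv_emit : ∀ (l : List (Int × (Int × Int × Int))) (acc : List Int × List (Int × Int × Int)),
    l.foldl (fun acc2 nx => (acc2.1 ++ [nx.1], acc2.2 ++ [nx.2])) acc
    = (acc.1 ++ l.map (·.1), acc.2 ++ l.map (·.2)) := by
  intro l
  induction l with
  | nil => intro acc; simp
  | cons nx rest ih => intro acc; simp [ih, List.append_assoc]

-- the contains-guard is redundant once c itself is a bucket key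
lemma pv_filter_contains (l : List (Int × String × String)) (c : String)
    (hc : pvBuckets0.contains c = true) :
    l.filter (fun je => pvBuckets0.contains je.2.2 && (je.2.2 == c))
      = l.filter (fun je => je.2.2 == c) := by
  apply List.filter_congr
  intro x _
  cases h : (x.2.2 == c) with
  | true => have hx : x.2.2 = c := eq_of_beq h; rw [hx]; simp [hc]
  | false => exact Bool.and_false _

-- every initial bucket is empty
lemma pv_b0_getD (c : String) : pvBuckets0.getD c [] = [] := by
  rw [PySem.Dict.getD_eq_get?_getD]
  cases hf : pvBuckets0.get? c with
  | none => rfl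
  | some v =>
    have hm := PySem.Dict.mem_items_of_get?_eq_some pvBuckets0 hf
    have hit : pvBuckets0.items
        = [("Fire", []), ("Destroyed buildings", []),
           ("Humanitarian Aid and rehabilitatiion", []),
           ("Military Vehicles", []), ("Combat", [])] := rfl
    rw [hit] at hm
    simp only [List.mem_cons, List.not_mem_nil, or_false, Prod.mk.injEq] at hm
    rcases hm with ⟨_, rfl⟩ | ⟨_, rfl⟩ | ⟨_, rfl⟩ | ⟨_, rfl⟩ | ⟨_, rfl⟩ <;> rfl

-- ===== VERDICT (by name: the statement is the Claim_ definition above) =====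
theorem arrange_events_in_priority_spec : Claim_equal_arrange_events_in_priority := by
  intro evs xyw _hdom _hpre
  unfold Spec_arrange_events_in_priority arrange_events_in_priority arrange_events_in_priority_alt
  simp only [pvPrio, List.foldl_cons, List.foldl_nil, pv_ainner, pv_bgroup, pv_emit, pvSel]
  rw [pv_filter_contains (PySem.List.enumerate evs 0) "Fire" (by decide),
      pv_filter_contains (PySem.List.enumerate evs 0) "Destroyed buildings" (by decide),
      pv_filter_contains (PySem.List.enumerate evs 0) "Humanitarian Aid and rehabilitatiion" (by decide),
      pv_filter_contains (PySem.List.enumerate evs 0) "Military Vehicles" (by decide),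
      pv_filter_contains (PySem.List.enumerate evs 0) "Combat" (by decide)]
  simp [pv_b0_getD, Function.comp_def, List.append_assoc]
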